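-- pv_equiv track=rewrite | github.com/pikachuaaaa/RPGBot | common/models/message_command_parsing/command_parser.py | format_positional_args
-- ===== SOURCE A (Python) =====
-- def format_positional_args(pos_tokens) -> list[str]:
--     positional_arguments: list[str] = []
--     current_token: str = ""
--     pos_tokens_len = len(pos_tokens)
--     list_expr_begin: bool = False
--
--     for token_i in range(pos_tokens_len):
--         if token_i + 1 < pos_tokens_len:
--             if pos_tokens[token_i + 1] == ',':
--                 if list_expr_begin:
--                     current_token += pos_tokens[token_i]
--                 else:
--                     current_token += "[" + pos_tokens[token_i]
--                     list_expr_begin = True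
--             else:
--                 if list_expr_begin:
--                     if pos_tokens[token_i] == ',':
--                         current_token += ','
--                     else:
--                         positional_arguments.append(current_token + pos_tokens[token_i] + "]")
--                         list_expr_begin = False
--                         current_token = ""
--                 else:
--                     positional_arguments.append(pos_tokens[token_i])
--         else:
--             if pos_tokens[token_i] == ',':
--                 if list_expr_begin:
--                     positional_arguments.append(current_token + "]")
--                 else:
--                     positional_arguments.append("[" + pos_tokens[token_i] + "]")
--             else:
--                 if list_expr_begin:
--                     positional_arguments.append(current_token + pos_tokens[token_i] + "]")
--                 else:
--                     positional_arguments.append(pos_tokens[token_i])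
--
--
--     return positional_arguments
-- ===== SOURCE B (Python) =====
-- def format_positional_args(pos_tokens) -> list[str]:
--     """Group comma-separated runs of tokens into bracketed list expressions.
--
--     A run starts at any token followed by ','; the commas between its tokens
--     are kept as separators, and a trailing separator at the end of the input
--     is tolerated.  Every other token passes through unchanged.
--     """
--     n = len(pos_tokens)
--     out = []
--     i = 0
--     while i < n:
--         if i + 1 < n and pos_tokens[i + 1] == ',':
--             j = i + 1
--             while j < n - 1 and (pos_tokens[j] == ',' or pos_tokens[j + 1] == ','):
--                 j += 1
--             seg = pos_tokens[i:j + 1]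
--             if seg[-1] == ',':
--                 seg.pop()  # tolerate a trailing separator
--             out.append('[' + ''.join(seg) + ']')
--             i = j + 1
--         else:
--             out.append(pos_tokens[i])
--             i += 1
--     return out
-- ===== Notes on version B (the rewrite author's own statement) =====
-- stated objective: simpler
-- what changed: Replaced A's single-pass lookahead state machine (current_token buffer + list_expr_begin flag threaded through every branch) by a segment decomposition: scan to each list-segment's end index, slice the tokens, and join the slice between brackets.
-- intended difference: On the single input [','], A wraps the lone comma as '[,]' although it emits an unattached comma raw everywhere else (e.g. [',', 'x'] -> [',', 'x']); B emits ',' uniformly, the consistent behaviour. — e.g. on format_positional_args([","]): A returns ["[,]"], B returns [","]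
import Mathlib
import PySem

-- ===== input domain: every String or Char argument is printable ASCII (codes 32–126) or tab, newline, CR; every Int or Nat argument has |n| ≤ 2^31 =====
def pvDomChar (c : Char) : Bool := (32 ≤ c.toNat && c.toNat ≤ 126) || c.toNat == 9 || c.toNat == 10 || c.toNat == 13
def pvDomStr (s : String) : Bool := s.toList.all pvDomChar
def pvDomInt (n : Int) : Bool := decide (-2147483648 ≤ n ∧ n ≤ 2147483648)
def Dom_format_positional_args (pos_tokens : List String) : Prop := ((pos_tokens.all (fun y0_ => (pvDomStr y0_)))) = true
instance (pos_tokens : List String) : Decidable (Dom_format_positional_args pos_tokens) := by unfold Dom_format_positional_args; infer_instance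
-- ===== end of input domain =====

-- B replaces A's one-pass lookahead state machine by a two-pass segment decomposition
-- (cut the tokens into list/non-list segments, then format each segment); objective: simpler.
-- On the single input [","] the two disagree by design (see D_ below).

-- ===== PORT A =====
-- loop body of A's 'for token_i in range(pos_tokens_len)'; state = (positional_arguments, current_token, list_expr_begin).
-- pos_tokens[token_i] / [token_i + 1] are only read at in-range nonnegative indices, so List.getD is exact there.
def aStep (toks : List String) (st : List String × String × Bool) (i : Nat) :
    List String × String × Bool :=
  match st with
  | (args, cur, lb) =>
    if i + 1 < toks.length then
      if toks.getD (i + 1) "" = "," then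
        if lb then (args, cur ++ toks.getD i "", lb)
        else (args, cur ++ ("[" ++ toks.getD i ""), true)
      else
        if lb then
          if toks.getD i "" = "," then (args, cur ++ ",", lb)
          else (args ++ [cur ++ toks.getD i "" ++ "]"], "", false)
        else (args ++ [toks.getD i ""], cur, lb)
    else
      if toks.getD i "" = "," then
        if lb then (args ++ [cur ++ "]"], cur, lb)
        else (args ++ ["[" ++ toks.getD i "" ++ "]"], cur, lb)
      else
        if lb then (args ++ [cur ++ toks.getD i "" ++ "]"], cur, lb)
        else (args ++ [toks.getD i ""], cur, lb)

def format_positional_args (pos_tokens : List String) : List String :=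
  ((List.range pos_tokens.length).foldl (aStep pos_tokens) ([], "", false)).1

-- ===== PORT B =====
-- Source B's inner loop 'while j < n - 1 and (pos_tokens[j] == ',' or pos_tokens[j + 1] == ',')'.
def bSegEnd (toks : List String) (j : Nat) : Nat :=
  if h : j < toks.length - 1 ∧ (toks.getD j "" = "," ∨ toks.getD (j + 1) "" = ",") then
    bSegEnd toks (j + 1)
  else j
termination_by toks.length - j
decreasing_by omega

theorem le_bSegEnd (toks : List String) (j : Nat) : j ≤ bSegEnd toks j := by
  unfold bSegEnd
  split
  · exact le_trans (Nat.le_succ j) (le_bSegEnd toks (j + 1))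
  · exact le_refl j
termination_by toks.length - j
decreasing_by rename_i h; omega

-- Source B's "if seg[-1] == ',': seg.pop()" (seg is always nonempty there)
def dropTrailingComma (seg : List String) : List String :=
  if seg.getLast? = some "," then seg.dropLast else seg

-- Source B's outer while loop, emitting the output elements in order; pos_tokens[i:j+1] with
-- 0 ≤ i ≤ j + 1 ≤ n is exactly (drop i).take (j + 1 - i).
def bGo (toks : List String) (i : Nat) : List String :=
  if hi : i < toks.length then
    if i + 1 < toks.length ∧ toks.getD (i + 1) "" = "," then
      ("[" ++ PySem.Str.join ""
          (dropTrailingComma ((toks.drop i).take (bSegEnd toks (i + 1) + 1 - i))) ++ "]")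
        :: bGo toks (bSegEnd toks (i + 1) + 1)
    else
      toks.getD i "" :: bGo toks (i + 1)
  else []
termination_by toks.length - i
decreasing_by
  · have := le_bSegEnd toks (i + 1); omega
  · omega

def format_positional_args_alt (pos_tokens : List String) : List String :=
  bGo pos_tokens 0

-- ===== PRECONDITION & SPEC =====
-- On the single input [","], A wraps the lone comma as "[,]" although it emits an unattached
-- comma raw everywhere else (e.g. [",", "x"] ↦ [",", "x"]); B emits "," uniformly, the
-- consistent behaviour.
def D_format_positional_args (pos_tokens : List String) : Prop := pos_tokens = [","]
instance (pos_tokens : List String) : Decidable (D_format_positional_args pos_tokens) := by unfold D_format_positional_args; infer_instance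

def Spec_format_positional_args (pos_tokens : List String) (out : List String) : Prop := ¬ D_format_positional_args pos_tokens → out = format_positional_args_alt pos_tokens
instance (pos_tokens : List String) (out : List String) : Decidable (Spec_format_positional_args pos_tokens out) := by unfold Spec_format_positional_args; infer_instance

def pvDiffWitness_format_positional_args : List String := [","]
def pvDiffWitnessOut_format_positional_args : (List String) × (List String) := (["[,]"], [","])

-- ===== CLAIM (what is proved, stated in full; the proofs are below) =====
def Claim_unchanged_format_positional_args : Prop := ∀ (pos_tokens : List String), Dom_format_positional_args pos_tokens → Spec_format_positional_args pos_tokens (format_positional_args pos_tokens)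
def Claim_changed_format_positional_args : Prop := Dom_format_positional_args (pvDiffWitness_format_positional_args) ∧ D_format_positional_args (pvDiffWitness_format_positional_args) ∧ format_positional_args (pvDiffWitness_format_positional_args) = pvDiffWitnessOut_format_positional_args.1 ∧ format_positional_args_alt (pvDiffWitness_format_positional_args) = pvDiffWitnessOut_format_positional_args.2 ∧ pvDiffWitnessOut_format_positional_args.1 ≠ pvDiffWitnessOut_format_positional_args.2
def Claim_exact_format_positional_args : Prop := ∀ (pos_tokens : List String), Dom_format_positional_args pos_tokens → D_format_positional_args pos_tokens → format_positional_args pos_tokens ≠ format_positional_args_alt pos_tokens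

-- ===== LEMMAS AND PROOFS =====

-- A's loop, as a recursion over the index (proved equal to the foldl over the range below)
def aLoop (toks : List String) (i : Nat) (st : List String × String × Bool) :
    List String × String × Bool :=
  if i < toks.length then aLoop toks (i + 1) (aStep toks st i) else st
termination_by toks.length - i
decreasing_by omega

theorem foldl_range'_eq_aLoop (toks : List String) :
    ∀ k i st, toks.length - i = k →
      (List.range' i k).foldl (aStep toks) st = aLoop toks i st := by
  intro k
  induction k with
  | zero =>
    intro i st hk
    rw [aLoop, if_neg (by omega : ¬ i < toks.length)]
    rfl
  | succ m ih =>
    intro i st hk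
    rw [List.range'_succ, aLoop, if_pos (by omega : i < toks.length)]
    exact ih (i + 1) (aStep toks st i) (by omega)

theorem format_eq_aLoop (toks : List String) :
    format_positional_args toks = (aLoop toks 0 ([], "", false)).1 := by
  unfold format_positional_args
  rw [List.range_eq_range', foldl_range'_eq_aLoop toks toks.length 0 _ (by omega)]

-- the string content A accumulates for the list segment that is open at index i
def segStr (toks : List String) (i : Nat) : String :=
  if i < toks.length - 1 ∧ (toks.getD i "" = "," ∨ toks.getD (i + 1) "" = ",") then
    toks.getD i "" ++ segStr toks (i + 1)
  else if toks.getD i "" = "," then "" else toks.getD i ""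
termination_by toks.length - i
decreasing_by omega

theorem join_empty_nil : PySem.Str.join "" ([] : List String) = "" := by decide

theorem join_empty_cons (x : String) (l : List String) :
    PySem.Str.join "" (x :: l) = x ++ PySem.Str.join "" l := by
  cases l with
  | nil => simp [PySem.Str.join, PySem.Chars.join_singleton]
  | cons y t => simp [PySem.Str.join, PySem.Chars.join_cons_cons]

theorem getLast?_cons_of_ne_nil (x : String) (l : List String) (h : l ≠ []) :
    (x :: l).getLast? = l.getLast? := by
  cases l with
  | nil => exact absurd rfl h
  | cons b t => simp [List.getLast?_cons_cons]

theorem dropTrailingComma_cons (x : String) (l : List String) (h : l ≠ []) :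
    dropTrailingComma (x :: l) = x :: dropTrailingComma l := by
  unfold dropTrailingComma
  rw [getLast?_cons_of_ne_nil x l h, List.dropLast_cons_of_ne_nil h]
  split <;> rfl

theorem drop_take_cons (toks : List String) (i e : Nat) (hi : i < toks.length) (he : i ≤ e) :
    (toks.drop i).take (e + 1 - i) = toks.getD i "" :: (toks.drop (i + 1)).take (e - i) := by
  rw [List.drop_eq_getElem_cons hi, List.getD_eq_getElem toks "" hi]
  rw [(by omega : e + 1 - i = (e - i) + 1), List.take_succ_cons]

theorem segStr_eq_join (toks : List String) :
    ∀ i, i < toks.length →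
      segStr toks i =
        PySem.Str.join "" (dropTrailingComma ((toks.drop i).take (bSegEnd toks i + 1 - i))) := by
  intro i hi
  rw [segStr, bSegEnd]
  by_cases h : i < toks.length - 1 ∧ (toks.getD i "" = "," ∨ toks.getD (i + 1) "" = ",")
  · have hlt1 : i < toks.length - 1 := h.1
    rw [if_pos h, dif_pos h]
    have hle : i + 1 ≤ bSegEnd toks (i + 1) := le_bSegEnd toks (i + 1)
    rw [drop_take_cons toks i (bSegEnd toks (i + 1)) hi (by omega)]
    have htail : (toks.drop (i + 1)).take (bSegEnd toks (i + 1) - i)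
        = (toks.drop (i + 1)).take (bSegEnd toks (i + 1) + 1 - (i + 1)) := by
      congr 1; omega
    have hne : (toks.drop (i + 1)).take (bSegEnd toks (i + 1) - i) ≠ [] := by
      rw [htail, drop_take_cons toks (i + 1) (bSegEnd toks (i + 1)) (by omega) (by omega)]
      exact List.cons_ne_nil _ _
    rw [dropTrailingComma_cons _ _ hne, join_empty_cons, htail,
      segStr_eq_join toks (i + 1) (by omega)]
  · rw [if_neg h, dif_neg h]
    rw [drop_take_cons toks i i hi (le_refl i), Nat.sub_self, List.take_zero]
    by_cases hc : toks.getD i "" = ","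
    · rw [if_pos hc, hc]
      rfl
    · rw [if_neg hc]
      have : dropTrailingComma [toks.getD i ""] = [toks.getD i ""] := by
        unfold dropTrailingComma
        simp only [List.getLast?_singleton, Option.some.injEq]
        rw [if_neg hc]
      rw [this, join_empty_cons, join_empty_nil, String.append_empty]
termination_by i => toks.length - i

-- the main invariant: A's loop from index i equals B's segment scan from index i;
-- the closed case needs to know that i is not a final lone comma (the D_ corner),
-- which holds at every call site the programs reach outside D_.
theorem aLoop_eq_bGo (toks : List String) :
    ∀ k i, toks.length - i = k →
      (∀ args, ¬ (i + 1 = toks.length ∧ toks.getD i "" = ",") →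
        (aLoop toks i (args, "", false)).1 = args ++ bGo toks i) ∧
      (∀ args cur, i < toks.length →
        (aLoop toks i (args, cur, true)).1 =
          args ++ ((cur ++ segStr toks i) ++ "]") :: bGo toks (bSegEnd toks i + 1)) := by
  intro k
  induction k with
  | zero =>
    intro i hk
    constructor
    · intro args _
      rw [aLoop, if_neg (by omega : ¬ i < toks.length), bGo,
        dif_neg (by omega : ¬ i < toks.length), List.append_nil]
    · intro args cur hi
      omega
  | succ m ih =>
    intro i hk
    have hi : i < toks.length := by omega
    have ih' := ih (i + 1) (by omega)
    constructor
    · -- closed state at i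
      intro args hD
      rw [aLoop, if_pos hi]
      simp only [aStep]
      by_cases h1 : i + 1 < toks.length
      · by_cases h2 : toks.getD (i + 1) "" = ","
        · -- a list segment opens at i
          rw [if_pos h1, if_pos h2, if_neg (by simp : ¬ (false = true)),
            ih'.2 _ _ h1]
          conv_rhs => rw [bGo]
          rw [dif_pos hi, if_pos (⟨h1, h2⟩ :
            i + 1 < toks.length ∧ toks.getD (i + 1) "" = ",")]
          have hseg : segStr toks i = toks.getD i "" ++ segStr toks (i + 1) := by
            rw [segStr, if_pos (⟨by omega, Or.inr h2⟩ : i < toks.length - 1 ∧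
              (toks.getD i "" = "," ∨ toks.getD (i + 1) "" = ","))]
          have hend : bSegEnd toks i = bSegEnd toks (i + 1) := by
            rw [bSegEnd, dif_pos (⟨by omega, Or.inr h2⟩ : i < toks.length - 1 ∧
              (toks.getD i "" = "," ∨ toks.getD (i + 1) "" = ","))]
          have hj := segStr_eq_join toks i hi
          rw [hseg, hend] at hj
          rw [← hj]
          simp [String.append_assoc, String.empty_append]
        · -- ordinary token at i
          rw [if_pos h1, if_neg h2, if_neg (by simp : ¬ (false = true)),
            ih'.1 _ (fun hc => h2 hc.2)]
          conv_rhs => rw [bGo]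
          rw [dif_pos hi, if_neg (fun hc => h2 hc.2)]
          simp
      · -- last index, closed; a comma here is exactly the D_ corner, excluded by hD
        have h1' : i + 1 = toks.length := by omega
        rw [if_neg h1]
        by_cases h2 : toks.getD i "" = ","
        · exact absurd ⟨h1', h2⟩ hD
        · rw [if_neg h2, if_neg (by simp : ¬ (false = true)),
            ih'.1 _ (fun hc => by omega)]
          conv_rhs => rw [bGo]
          rw [dif_pos hi, if_neg (fun hc => h1 hc.1)]
          simp
    · -- open state at i, accumulated prefix cur
      intro args cur _
      rw [aLoop, if_pos hi]
      simp only [aStep]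
      by_cases h1 : i + 1 < toks.length
      · by_cases h2 : toks.getD (i + 1) "" = ","
        · -- next token is a comma: keep accumulating
          rw [if_pos h1, if_pos h2, if_pos trivial, ih'.2 _ _ h1]
          have hseg : segStr toks i = toks.getD i "" ++ segStr toks (i + 1) := by
            rw [segStr, if_pos (⟨by omega, Or.inr h2⟩ : i < toks.length - 1 ∧
              (toks.getD i "" = "," ∨ toks.getD (i + 1) "" = ","))]
          have hend : bSegEnd toks i = bSegEnd toks (i + 1) := by
            rw [bSegEnd, dif_pos (⟨by omega, Or.inr h2⟩ : i < toks.length - 1 ∧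
              (toks.getD i "" = "," ∨ toks.getD (i + 1) "" = ","))]
          rw [hseg, hend]
          simp [String.append_assoc]
        · by_cases h3 : toks.getD i "" = ","
          · -- interior comma: keep accumulating
            rw [if_pos h1, if_neg h2, if_pos trivial, if_pos h3, ih'.2 _ _ h1]
            have hseg : segStr toks i = toks.getD i "" ++ segStr toks (i + 1) := by
              rw [segStr, if_pos (⟨by omega, Or.inl h3⟩ : i < toks.length - 1 ∧
                (toks.getD i "" = "," ∨ toks.getD (i + 1) "" = ","))]
            have hend : bSegEnd toks i = bSegEnd toks (i + 1) := by
              rw [bSegEnd, dif_pos (⟨by omega, Or.inl h3⟩ : i < toks.length - 1 ∧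
                (toks.getD i "" = "," ∨ toks.getD (i + 1) "" = ","))]
            rw [hseg, hend, h3]
            simp [String.append_assoc]
          · -- the segment closes at i
            rw [if_pos h1, if_neg h2, if_pos trivial, if_neg h3,
              ih'.1 _ (fun hc => h2 hc.2)]
            have hcond : ¬ (i < toks.length - 1 ∧
                (toks.getD i "" = "," ∨ toks.getD (i + 1) "" = ",")) :=
              fun hc => hc.2.elim h3 h2
            have hseg : segStr toks i = toks.getD i "" := by
              rw [segStr, if_neg hcond, if_neg h3]
            have hend : bSegEnd toks i = i := by rw [bSegEnd, dif_neg hcond]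
            rw [hseg, hend]
            simp [String.append_assoc]
      · -- last index, open
        have hcond : ¬ (i < toks.length - 1 ∧
            (toks.getD i "" = "," ∨ toks.getD (i + 1) "" = ",")) :=
          fun hc => absurd hc.1 (by omega)
        have hend : bSegEnd toks i = i := by rw [bSegEnd, dif_neg hcond]
        rw [if_neg h1]
        by_cases h2 : toks.getD i "" = ","
        · rw [if_pos h2, if_pos trivial, aLoop, if_neg (by omega : ¬ i + 1 < toks.length)]
          have hseg : segStr toks i = "" := by rw [segStr, if_neg hcond, if_pos h2]
          rw [hseg, hend, bGo, dif_neg (by omega : ¬ i + 1 < toks.length)]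
          simp
        · rw [if_neg h2, if_pos trivial, aLoop, if_neg (by omega : ¬ i + 1 < toks.length)]
          have hseg : segStr toks i = toks.getD i "" := by
            rw [segStr, if_neg hcond, if_neg h2]
          rw [hseg, hend, bGo, dif_neg (by omega : ¬ i + 1 < toks.length)]

-- ===== VERDICT (by name: the statements are the Claim_ definitions above) =====
theorem format_positional_args_spec : Claim_unchanged_format_positional_args := by
  intro toks _ hD
  show format_positional_args toks = format_positional_args_alt toks
  have h0 : ¬ (0 + 1 = toks.length ∧ toks.getD 0 "" = ",") := by
    rintro ⟨h1, h2⟩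
    apply hD
    show toks = [","]
    match toks, h1 with
    | [t], _ => simpa using h2
  rw [format_eq_aLoop, (aLoop_eq_bGo toks (toks.length - 0) 0 rfl).1 [] h0]
  rfl

theorem alt_comma : format_positional_args_alt [","] = [","] := by
  show bGo [","] 0 = [","]
  rw [bGo, dif_pos (by decide : 0 < ([","] : List String).length),
    if_neg (by decide :
      ¬ (0 + 1 < ([","] : List String).length ∧ ([","] : List String).getD (0 + 1) "" = ",")),
    bGo, dif_neg (by decide : ¬ 0 + 1 < ([","] : List String).length)]
  decide

theorem format_positional_args_changed : Claim_changed_format_positional_args := by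
  unfold Claim_changed_format_positional_args
  exact ⟨by decide, by decide, by decide, alt_comma, by decide⟩

theorem format_positional_args_tight : Claim_exact_format_positional_args := by
  intro toks _ hD
  rw [show toks = [","] from hD, alt_comma]
  decide
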